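-- pv_equiv track=rewrite | github.com/sermpezis/bgp-estimation | peering_experiments/utils.py | map_asn_to_u_mux_rel
-- ===== SOURCE A (Python) =====
-- def map_asn_to_u_mux_rel(asn_to_mux_rel, mux_to_asn_rel):
--     asn_to_u_mux = {}
--     asn_to_u_mux_rel = {}
--     mux_to_u_asn = {}
--     mux_to_u_asn_rel = {}
--     for asn in asn_to_mux_rel:
--         mux_to_rel = asn_to_mux_rel[asn]
--         # single mux
--         if len(mux_to_rel) == 1:
--             u_mux = list(mux_to_rel.keys())[0]
--             asn_to_u_mux[asn] = u_mux
--             asn_to_u_mux_rel[asn] = [u_mux, mux_to_rel[u_mux]]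
--         else:
--             # first map rel to mux(es)
--             rel_to_mux = {}
--             for mux in mux_to_rel:
--                 rel = mux_to_rel[mux]
--                 if rel not in rel_to_mux:
--                     rel_to_mux[rel] = set()
--                 rel_to_mux[rel].add(mux)
--             # then check if 'peer' and 'transit' exist --> prefer transit
--             if 'transit' in rel_to_mux:
--                 if len(rel_to_mux['transit']) == 1:
--                     u_mux = list(rel_to_mux['transit'])[0]
--                     asn_to_u_mux[asn] = u_mux
--                     asn_to_u_mux_rel[asn] = [u_mux, 'transit']
--             elif 'peer' in rel_to_mux:
--                 if len(rel_to_mux['peer']) == 1: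
--                     u_mux = list(rel_to_mux['peer'])[0]
--                     asn_to_u_mux[asn] = u_mux
--                     asn_to_u_mux_rel[asn] = [u_mux, 'peer']
--     all_other_mux_asns = {}
--     for mux in mux_to_asn_rel:
--         all_other_mux_asns[mux] = set()
--         for other_mux in mux_to_asn_rel:
--             if mux != other_mux:
--                 all_other_mux_asns[mux].update(set(mux_to_asn_rel[other_mux].keys()))
--     for mux in mux_to_asn_rel:
--         if not set(mux_to_asn_rel[mux].keys()).intersection(all_other_mux_asns[mux]):
--             u_asns = list(mux_to_asn_rel[mux].keys())
--             mux_to_u_asn[mux] = u_asns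
--             mux_to_u_asn_rel[mux] = {}
--             for u_asn in u_asns:
--                 mux_to_u_asn_rel[mux][u_asn] = mux_to_asn_rel[mux][u_asn]
--     return (asn_to_u_mux, asn_to_u_mux_rel, mux_to_u_asn, mux_to_u_asn_rel)
-- ===== SOURCE B (Python) =====
-- def map_asn_to_u_mux_rel(asn_to_mux_rel, mux_to_asn_rel):
--     asn_to_u_mux = {}
--     asn_to_u_mux_rel = {}
--     for asn, mux_to_rel in asn_to_mux_rel.items():
--         items = list(mux_to_rel.items())
--         if len(items) == 1:
--             choice = items[0]
--         else:
--             transit = [m for m, r in items if r == 'transit']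
--             peer = [m for m, r in items if r == 'peer']
--             if transit:
--                 choice = (transit[0], 'transit') if len(transit) == 1 else None
--             elif len(peer) == 1:
--                 choice = (peer[0], 'peer')
--             else:
--                 choice = None
--         if choice is not None:
--             asn_to_u_mux[asn] = choice[0]
--             asn_to_u_mux_rel[asn] = [choice[0], choice[1]]
--     # one pass: how many muxes contain each ASN
--     counts = {}
--     for d in mux_to_asn_rel.values():
--         for asn in d:
--             counts[asn] = counts.get(asn, 0) + 1
--     mux_to_u_asn = {}
--     mux_to_u_asn_rel = {}
--     for mux, d in mux_to_asn_rel.items():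
--         if all(counts[a] == 1 for a in d):
--             mux_to_u_asn[mux] = list(d)
--             mux_to_u_asn_rel[mux] = dict(d)
--     return (asn_to_u_mux, asn_to_u_mux_rel, mux_to_u_asn, mux_to_u_asn_rel)
-- ===== Notes on version B (the rewrite author's own statement) =====
-- stated objective: faster
-- what changed: The quadratic 'union of all other muxes' ASN sets per mux' is replaced by a single per-ASN occurrence counter built in one pass (a mux is kept iff all its ASNs occur exactly once overall), and the per-ASN rel->set-of-muxes grouping dict is replaced by two direct filters for 'transit' and 'peer'.
import Mathlib
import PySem

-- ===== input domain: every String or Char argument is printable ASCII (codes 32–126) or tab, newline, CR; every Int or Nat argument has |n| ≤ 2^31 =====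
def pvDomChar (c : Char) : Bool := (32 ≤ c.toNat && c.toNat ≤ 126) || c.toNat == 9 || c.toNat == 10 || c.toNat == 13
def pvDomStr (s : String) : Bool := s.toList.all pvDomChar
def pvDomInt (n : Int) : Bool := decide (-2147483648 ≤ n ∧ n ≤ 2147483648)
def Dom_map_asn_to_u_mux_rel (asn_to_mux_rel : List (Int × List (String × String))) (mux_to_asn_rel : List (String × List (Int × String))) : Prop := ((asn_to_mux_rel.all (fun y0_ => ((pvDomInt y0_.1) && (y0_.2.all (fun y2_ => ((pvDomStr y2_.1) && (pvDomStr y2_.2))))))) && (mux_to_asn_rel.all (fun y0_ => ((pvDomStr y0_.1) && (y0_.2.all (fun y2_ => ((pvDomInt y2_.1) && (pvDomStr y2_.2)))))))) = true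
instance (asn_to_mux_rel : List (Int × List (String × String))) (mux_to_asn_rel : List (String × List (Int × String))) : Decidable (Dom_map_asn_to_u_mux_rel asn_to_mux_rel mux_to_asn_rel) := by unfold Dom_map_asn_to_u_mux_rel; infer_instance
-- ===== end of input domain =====

-- B replaces A's quadratic all-other-mux set unions by a single per-ASN occurrence counter and
-- A's rel→set-of-muxes grouping dict by two direct filters; equivalence of the RETURN value is proved
-- on dict-shaped inputs (no duplicate keys).

-- ===== PORT A =====
-- one iteration of A's first loop ('for asn in asn_to_mux_rel'); dicts iterated via their items,
-- exact for Python dicts.  'list(rel_to_mux[...])[0]' reads the sole element of a singleton set,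
-- which is order-independent; ported as .getD 0 "".
def pvAStep1 (acc : PySem.Dict Int String × PySem.Dict Int (List String))
    (p : Int × List (String × String)) :
    PySem.Dict Int String × PySem.Dict Int (List String) :=
  let asn := p.1
  let mux_to_rel := p.2
  if mux_to_rel.length == 1 then
    let u_mux := (mux_to_rel.map (·.1)).getD 0 ""
    let rel := (PySem.Dict.mk mux_to_rel).getD u_mux ""
    (acc.1.insert asn u_mux, acc.2.insert asn [u_mux, rel])
  else
    -- rel_to_mux: 'if rel not in rel_to_mux: rel_to_mux[rel] = set()' + '.add(mux)' = modify with default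
    let rel_to_mux : PySem.Dict String (PySem.Set String) :=
      mux_to_rel.foldl (fun d q => d.modify q.2 PySem.Set.empty (fun s => PySem.Set.add s q.1))
        PySem.Dict.empty
    if rel_to_mux.contains "transit" then
      if (rel_to_mux.getD "transit" PySem.Set.empty).length == 1 then
        let u_mux := (rel_to_mux.getD "transit" PySem.Set.empty).getD 0 ""
        (acc.1.insert asn u_mux, acc.2.insert asn [u_mux, "transit"])
      else acc
    else if rel_to_mux.contains "peer" then
      if (rel_to_mux.getD "peer" PySem.Set.empty).length == 1 then
        let u_mux := (rel_to_mux.getD "peer" PySem.Set.empty).getD 0 ""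
        (acc.1.insert asn u_mux, acc.2.insert asn [u_mux, "peer"])
      else acc
    else acc

-- A's second loop: all_other_mux_asns[mux] = union of the key sets of every OTHER mux
def pvAOthers (mux_to_asn_rel : List (String × List (Int × String))) :
    PySem.Dict String (PySem.Set Int) :=
  mux_to_asn_rel.foldl (fun d p =>
    d.insert p.1
      (mux_to_asn_rel.foldl (fun s q =>
        if p.1 == q.1 then s else PySem.Set.update s (PySem.Set.ofList (q.2.map (·.1))))
        PySem.Set.empty))
    PySem.Dict.empty

-- one iteration of A's third loop
def pvAStep3 (others : PySem.Dict String (PySem.Set Int))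
    (acc : PySem.Dict String (List Int) × PySem.Dict String (List (Int × String)))
    (p : String × List (Int × String)) :
    PySem.Dict String (List Int) × PySem.Dict String (List (Int × String)) :=
  if (PySem.Set.inter (PySem.Set.ofList (p.2.map (·.1))) (others.getD p.1 PySem.Set.empty)).isEmpty then
    let u_asns := p.2.map (·.1)
    let inner : PySem.Dict Int String :=
      u_asns.foldl (fun d a => d.insert a ((PySem.Dict.mk p.2).getD a "")) PySem.Dict.empty
    (acc.1.insert p.1 u_asns, acc.2.insert p.1 inner.items)
  else acc

def map_asn_to_u_mux_rel (asn_to_mux_rel : List (Int × List (String × String))) (mux_to_asn_rel : List (String × List (Int × String))) : (List (Int × String)) × (List (Int × List String)) × (List (String × List Int)) × (List (String × List (Int × String))) :=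
  let part1 := asn_to_mux_rel.foldl pvAStep1 (PySem.Dict.empty, PySem.Dict.empty)
  let others := pvAOthers mux_to_asn_rel
  let part2 := mux_to_asn_rel.foldl (pvAStep3 others) (PySem.Dict.empty, PySem.Dict.empty)
  (part1.1.items, part1.2.items, part2.1.items, part2.2.items)

-- ===== PORT B =====
-- B's per-ASN choice: direct filters instead of a rel→set-of-muxes grouping dict
def pvBChoice (mux_to_rel : List (String × String)) : Option (String × String) :=
  if mux_to_rel.length == 1 then
    some ((mux_to_rel.map (·.1)).getD 0 "", (mux_to_rel.map (·.2)).getD 0 "")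
  else
    let transit := (mux_to_rel.filter (fun q => q.2 == "transit")).map (·.1)
    let peer := (mux_to_rel.filter (fun q => q.2 == "peer")).map (·.1)
    if !transit.isEmpty then
      if transit.length == 1 then some (transit.getD 0 "", "transit") else none
    else if peer.length == 1 then some (peer.getD 0 "", "peer") else none

def pvBStep1 (acc : PySem.Dict Int String × PySem.Dict Int (List String))
    (p : Int × List (String × String)) :
    PySem.Dict Int String × PySem.Dict Int (List String) :=
  match pvBChoice p.2 with
  | some c => (acc.1.insert p.1 c.1, acc.2.insert p.1 [c.1, c.2])
  | none => acc

-- B's counter: counts[asn] = number of muxes whose dict contains asn (one pass)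
def pvBCounts (mux_to_asn_rel : List (String × List (Int × String))) : PySem.Dict Int Int :=
  mux_to_asn_rel.foldl (fun c p =>
    (p.2.map (·.1)).foldl (fun c a => c.insert a (c.getD a 0 + 1)) c) PySem.Dict.empty

def pvBStep3 (counts : PySem.Dict Int Int)
    (acc : PySem.Dict String (List Int) × PySem.Dict String (List (Int × String)))
    (p : String × List (Int × String)) :
    PySem.Dict String (List Int) × PySem.Dict String (List (Int × String)) :=
  if p.2.all (fun q => counts.getD q.1 0 == 1) then
    (acc.1.insert p.1 (p.2.map (·.1)), acc.2.insert p.1 p.2)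
  else acc

def map_asn_to_u_mux_rel_alt (asn_to_mux_rel : List (Int × List (String × String))) (mux_to_asn_rel : List (String × List (Int × String))) : (List (Int × String)) × (List (Int × List String)) × (List (String × List Int)) × (List (String × List (Int × String))) :=
  let part1 := asn_to_mux_rel.foldl pvBStep1 (PySem.Dict.empty, PySem.Dict.empty)
  let counts := pvBCounts mux_to_asn_rel
  let part2 := mux_to_asn_rel.foldl (pvBStep3 counts) (PySem.Dict.empty, PySem.Dict.empty)
  (part1.1.items, part1.2.items, part2.1.items, part2.2.items)

-- ===== PRECONDITION & SPEC =====
-- Pre_ requires every outer and inner key list to be duplicate-free: the arguments are Python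
-- dicts, and an association list with duplicate keys encodes no dict, so A never receives one.
def Pre_map_asn_to_u_mux_rel (asn_to_mux_rel : List (Int × List (String × String))) (mux_to_asn_rel : List (String × List (Int × String))) : Prop :=
  (asn_to_mux_rel.map (·.1)).Nodup ∧ (∀ p ∈ asn_to_mux_rel, (p.2.map (·.1)).Nodup) ∧
  (mux_to_asn_rel.map (·.1)).Nodup ∧ (∀ p ∈ mux_to_asn_rel, (p.2.map (·.1)).Nodup)
instance (asn_to_mux_rel : List (Int × List (String × String))) (mux_to_asn_rel : List (String × List (Int × String))) : Decidable (Pre_map_asn_to_u_mux_rel asn_to_mux_rel mux_to_asn_rel) := by unfold Pre_map_asn_to_u_mux_rel; infer_instance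
def pvWitness_map_asn_to_u_mux_rel : (List (Int × List (String × String))) × (List (String × List (Int × String))) :=
  ([(1, [("m1", "transit"), ("m2", "peer")]), (2, [("m2", "peer")])],
   [("m1", [(1, "transit")]), ("m2", [(1, "peer"), (2, "peer")])])
def Spec_map_asn_to_u_mux_rel (asn_to_mux_rel : List (Int × List (String × String))) (mux_to_asn_rel : List (String × List (Int × String))) (out : (List (Int × String)) × (List (Int × List String)) × (List (String × List Int)) × (List (String × List (Int × String)))) : Prop := out = map_asn_to_u_mux_rel_alt asn_to_mux_rel mux_to_asn_rel
instance (asn_to_mux_rel : List (Int × List (String × String))) (mux_to_asn_rel : List (String × List (Int × String))) (out : (List (Int × String)) × (List (Int × List String)) × (List (String × List Int)) × (List (String × List (Int × String)))) : Decidable (Spec_map_asn_to_u_mux_rel asn_to_mux_rel mux_to_asn_rel out) := by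
  unfold Spec_map_asn_to_u_mux_rel
  exact @instDecidableEqProd _ _ (by infer_instance) (@instDecidableEqProd _ _ (by infer_instance) (@instDecidableEqProd _ _ (by infer_instance) (by infer_instance))) _ _

-- ===== CLAIM (what is proved, stated in full; the proofs are below) =====
def Claim_equal_map_asn_to_u_mux_rel : Prop := ∀ (asn_to_mux_rel : List (Int × List (String × String))) (mux_to_asn_rel : List (String × List (Int × String))), Dom_map_asn_to_u_mux_rel asn_to_mux_rel mux_to_asn_rel → Pre_map_asn_to_u_mux_rel asn_to_mux_rel mux_to_asn_rel → Spec_map_asn_to_u_mux_rel asn_to_mux_rel mux_to_asn_rel (map_asn_to_u_mux_rel asn_to_mux_rel mux_to_asn_rel)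

-- ===== LEMMAS AND PROOFS =====
-- A's rel_to_mux fold: value at r = previous value updated with the muxes whose rel is r
theorem pvRelToMux_getD (l : List (String × String)) (d : PySem.Dict String (PySem.Set String)) (r : String) :
    ((l.foldl (fun d q => d.modify q.2 PySem.Set.empty (fun s => PySem.Set.add s q.1)) d).getD r PySem.Set.empty)
      = PySem.Set.update (d.getD r PySem.Set.empty) ((l.filter (fun q => q.2 == r)).map (·.1)) := by
  induction l generalizing d with
  | nil => simp [PySem.Set.update]
  | cons q t ih =>
    simp only [List.foldl_cons, List.filter_cons]
    rw [ih]
    by_cases h : q.2 = r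
    · simp [h, PySem.Set.update_cons]
    · simp [h, PySem.Dict.getD_modify, Ne.symm h]

-- A's rel_to_mux fold: key membership = some pair has that rel
theorem pvRelToMux_contains (l : List (String × String)) (r : String) :
    ((l.foldl (fun d q => d.modify q.2 PySem.Set.empty (fun s => PySem.Set.add s q.1)) (PySem.Dict.empty : PySem.Dict String (PySem.Set String))).contains r) = !((l.filter (fun q => q.2 == r)).isEmpty) := by
  rw [PySem.Dict.contains_eq_decide_mem_keys, PySem.Dict.keys_foldl_modify_key]
  simp only [PySem.Dict.keys_empty, PySem.Set.update_nil_left, PySem.Set.mem_ofList]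
  rcases Bool.eq_false_or_eq_true ((l.filter (fun q => q.2 == r)).isEmpty) with h | h <;>
    simp_all [List.isEmpty_iff, List.filter_eq_nil_iff, List.mem_map]
  have hf : (l.filter (fun q => q.2 == r)) = [] :=
    List.filter_eq_nil_iff.mpr (fun q hq => by simpa using h q.1 q.2 hq)
  have hm : r ∉ l.map Prod.snd := by
    simp only [List.mem_map]; rintro ⟨q, hq, rfl⟩; exact h q.1 q.2 hq rfl
  simp [hf, hm]

-- per-element agreement of the two first loops
theorem pvStep1_eq (acc : PySem.Dict Int String × PySem.Dict Int (List String))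
    (p : Int × List (String × String)) (h : (p.2.map (·.1)).Nodup) :
    pvAStep1 acc p = pvBStep1 acc p := by
  rcases p with ⟨asn, l⟩
  simp only at h
  unfold pvAStep1 pvBStep1 pvBChoice
  by_cases hlen : l.length = 1
  · obtain ⟨q, rfl⟩ := List.length_eq_one_iff.mp hlen
    rcases q with ⟨q1, q2⟩
    simp [PySem.Dict.getD_eq_get?_getD, PySem.Dict.get?_mk_cons]
  · have hlb : (l.length == 1) = false := by simpa using hlen
    simp only [hlb, Bool.false_eq_true, if_false]
    rw [pvRelToMux_contains, pvRelToMux_contains, pvRelToMux_getD, pvRelToMux_getD]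
    have hT : ((l.filter (fun q => q.2 == "transit")).map (·.1)).Nodup :=
      h.sublist (List.Sublist.map _ List.filter_sublist)
    have hP : ((l.filter (fun q => q.2 == "peer")).map (·.1)).Nodup :=
      h.sublist (List.Sublist.map _ List.filter_sublist)
    rw [PySem.Dict.getD_empty, PySem.Dict.getD_empty, PySem.Set.update_empty,
      PySem.Set.update_empty]
    simp only [PySem.Set.ofList_eq_self_of_nodup _ hT, PySem.Set.ofList_eq_self_of_nodup _ hP]
    simp only [List.isEmpty_map]
    rcases Bool.eq_false_or_eq_true ((l.filter (fun q => q.2 == "transit")).isEmpty) with ht | ht <;>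
      rcases Bool.eq_false_or_eq_true ((l.filter (fun q => q.2 == "peer")).isEmpty) with hp | hp <;>
      (try simp [ht, hp]) <;> split_ifs <;> simp_all [List.isEmpty_iff]
    exact absurd ‹(List.filter (fun q => q.2 == "peer") l).length = 1› (by
      have h0 : (List.filter (fun q => q.2 == "peer") l) = [] :=
        List.filter_eq_nil_iff.mpr (fun q hq hpe => hp q.1 q.2 (by simpa using hq) (by simpa using hpe))
      simp [h0])

-- B's counter value = total number of occurrences of a among the key lists
theorem pvCounts_getD (l : List (String × List (Int × String))) (c : PySem.Dict Int Int) (a : Int) :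
    ((l.foldl (fun c p => (p.2.map (·.1)).foldl (fun c a => c.insert a (c.getD a 0 + 1)) c) c).getD a 0)
      = c.getD a 0 + ((l.map (fun p => p.2.map (·.1))).flatten).count a := by
  induction l generalizing c with
  | nil => simp
  | cons p t ih =>
    simp only [List.foldl_cons, List.map_cons, List.flatten_cons, List.count_append]
    rw [ih, PySem.Dict.getD_foldl_insert_add_one]
    push_cast
    ring

-- membership in A's "all other muxes' asns" union
theorem pvOthers_mem (l : List (String × List (Int × String))) (m : String) (s0 : PySem.Set Int) (a : Int) :
    a ∈ (l.foldl (fun s q => if m == q.1 then s else PySem.Set.update s (PySem.Set.ofList (q.2.map (·.1)))) s0)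
      ↔ a ∈ s0 ∨ ∃ q ∈ l, q.1 ≠ m ∧ a ∈ q.2.map (·.1) := by
  induction l generalizing s0 with
  | nil => simp
  | cons q t ih =>
    simp only [List.foldl_cons]
    by_cases h : m = q.1
    · have hb : (m == q.1) = true := by simpa using h
      simp only [hb, if_true]
      rw [ih]
      constructor
      · rintro (hs | ⟨r, hr, h1, h2⟩)
        · exact Or.inl hs
        · exact Or.inr ⟨r, List.mem_cons_of_mem _ hr, h1, h2⟩
      · rintro (hs | ⟨r, hr, h1, h2⟩)
        · exact Or.inl hs
        · rcases List.mem_cons.mp hr with rfl | hr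
          · exact absurd h.symm h1
          · exact Or.inr ⟨r, hr, h1, h2⟩
    · have hb : (m == q.1) = false := by simpa using h
      simp only [hb, Bool.false_eq_true, if_false, ih, PySem.Set.mem_update, PySem.Set.mem_ofList]
      constructor
      · rintro ((hs | hq) | ⟨r, hr, h1, h2⟩)
        · exact Or.inl hs
        · exact Or.inr ⟨q, List.mem_cons_self, fun he => h he.symm, hq⟩
        · exact Or.inr ⟨r, List.mem_cons_of_mem _ hr, h1, h2⟩
      · rintro (hs | ⟨r, hr, h1, h2⟩)
        · exact Or.inl (Or.inl hs)
        · rcases List.mem_cons.mp hr with rfl | hr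
          · exact Or.inl (Or.inr h2)
          · exact Or.inr ⟨r, hr, h1, h2⟩

-- A's others dict looked up at an entry's own key
theorem pvOthers_getD (l : List (String × List (Int × String))) (p : String × List (Int × String))
    (hnd : (l.map (·.1)).Nodup) (hp : p ∈ l) :
    (pvAOthers l).getD p.1 PySem.Set.empty
      = l.foldl (fun s q => if p.1 == q.1 then s else PySem.Set.update s (PySem.Set.ofList (q.2.map (·.1)))) PySem.Set.empty := by
  unfold pvAOthers
  have hfresh : ∀ x ∈ l, (PySem.Dict.empty : PySem.Dict String (PySem.Set Int)).contains x.1 = false :=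
    fun x _ => PySem.Dict.contains_empty ..
  have hitems := PySem.Dict.items_foldl_insert_fresh l (k := (·.1))
    (v := fun p => l.foldl (fun s q => if p.1 == q.1 then s else PySem.Set.update s (PySem.Set.ofList (q.2.map (·.1)))) PySem.Set.empty)
    (d := PySem.Dict.empty) hfresh hnd
  beta_reduce at hitems
  have hkeys : (l.foldl (fun d p =>
      d.insert p.1 (l.foldl (fun s q => if p.1 == q.1 then s else PySem.Set.update s (PySem.Set.ofList (q.2.map (·.1)))) PySem.Set.empty)) (PySem.Dict.empty : PySem.Dict String (PySem.Set Int))).keys.Nodup := by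
    simp only [PySem.Dict.keys, hitems]
    simpa [PySem.Dict.empty, Function.comp] using hnd
  exact PySem.Dict.getD_of_mem_items _ (by
    rw [hitems]
    exact List.mem_append_right _ (List.mem_map_of_mem hp)) hkeys PySem.Set.empty

-- A's rebuilt inner dict is the original inner association list
theorem pvInner_items (p2 : List (Int × String)) (h : (p2.map (·.1)).Nodup) :
    ((p2.map (·.1)).foldl (fun d a => d.insert a ((PySem.Dict.mk p2).getD a "")) (PySem.Dict.empty : PySem.Dict Int String)).items = p2 := by
  have hfresh : ∀ x ∈ p2.map (·.1), (PySem.Dict.empty : PySem.Dict Int String).contains x = false :=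
    fun x _ => PySem.Dict.contains_empty ..
  have hnd : ((p2.map (·.1)).map id).Nodup := by simpa using h
  have hitems := PySem.Dict.items_foldl_insert_fresh (p2.map (·.1)) (k := id)
    (v := fun a => (PySem.Dict.mk p2).getD a "") (d := PySem.Dict.empty) hfresh hnd
  simp only [id] at hitems
  rw [hitems]
  have := PySem.Dict.items_eq_map_keys (PySem.Dict.mk p2) (by simpa using h) ""
  simp only [PySem.Dict.keys_mk] at this
  simpa using this.symm

-- countP = 1 iff the only entry satisfying P is p (nodup list, P p holds)
theorem pvCountP_eq_one (l : List (String × List (Int × String))) (P : (String × List (Int × String)) → Bool)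
    (p : String × List (Int × String)) (hl : l.Nodup) (hp : p ∈ l) (hPp : P p = true) :
    (l.countP P = 1 ↔ ∀ q ∈ l, P q = true → q = p) := by
  rw [List.countP_eq_length_filter]
  have hpf : p ∈ l.filter P := List.mem_filter.mpr ⟨hp, hPp⟩
  constructor
  · intro h1 q hq hPq
    obtain ⟨x, hx⟩ := List.length_eq_one_iff.mp h1
    have hqf : q ∈ l.filter P := List.mem_filter.mpr ⟨hq, hPq⟩
    rw [hx] at hpf hqf
    simp only [List.mem_singleton] at hpf hqf
    rw [hqf, hpf]
  · intro h
    have hnd : (l.filter P).Nodup := hl.filter P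
    have hall : ∀ q ∈ l.filter P, q = p := fun q hq =>
      h q (List.mem_of_mem_filter hq) (List.of_mem_filter hq)
    cases hf : l.filter P with
    | nil => rw [hf] at hpf; simp at hpf
    | cons x xs =>
      rw [hf] at hnd hall
      have hx : x = p := hall x List.mem_cons_self
      cases hxs : xs with
      | nil => simp
      | cons y ys =>
        exfalso
        have hy : y = p := hall y (by simp [hxs])
        have hxnm : x ∉ xs := (List.nodup_cons.mp hnd).1
        rw [hxs] at hxnm
        exact hxnm (by simp [hx, hy])

-- total occurrence count across all key lists = number of entries whose keys contain a
theorem pvFlattenCount (l : List (String × List (Int × String))) (a : Int)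
    (hinner : ∀ q ∈ l, (q.2.map (·.1)).Nodup) :
    ((l.map (fun p => p.2.map (·.1))).flatten).count a
      = l.countP (fun q => decide (a ∈ q.2.map (·.1))) := by
  induction l with
  | nil => simp
  | cons q t ih =>
    simp only [List.map_cons, List.flatten_cons, List.count_append, List.countP_cons]
    rw [ih (fun r hr => hinner r (List.mem_cons_of_mem _ hr))]
    by_cases hm : a ∈ q.2.map (·.1)
    · rw [List.count_eq_one_of_mem (hinner q List.mem_cons_self) hm]
      simp [hm, Nat.add_comm]
    · rw [List.count_eq_zero_of_not_mem hm]
      simp [hm]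

-- the keep conditions agree on every entry of the list
theorem pvCond_eq (l : List (String × List (Int × String))) (p : String × List (Int × String))
    (hnd : (l.map (·.1)).Nodup) (hinner : ∀ q ∈ l, (q.2.map (·.1)).Nodup) (hp : p ∈ l) :
    ((PySem.Set.inter (PySem.Set.ofList (p.2.map (·.1))) ((pvAOthers l).getD p.1 PySem.Set.empty)).isEmpty)
      = (p.2.all (fun q => (pvBCounts l).getD q.1 0 == 1)) := by
  have hcnt : ∀ a : Int, (pvBCounts l).getD a 0
      = (((l.map (fun p => p.2.map (·.1))).flatten).count a : Int) := by
    intro a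
    unfold pvBCounts
    rw [pvCounts_getD]
    simp
  have hcore : ∀ a : Int, a ∈ p.2.map (·.1) →
      ((¬ ∃ q ∈ l, q.1 ≠ p.1 ∧ a ∈ q.2.map (·.1))
        ↔ ((l.map (fun p => p.2.map (·.1))).flatten).count a = 1) := by
    intro a ha
    rw [pvFlattenCount l a hinner,
      pvCountP_eq_one l _ p (hnd.of_map) hp (by simpa using ha)]
    constructor
    · intro h q hq hPq
      by_cases hq1 : q.1 = p.1
      · exact List.inj_on_of_nodup_map hnd hq hp hq1
      · exact absurd ⟨q, hq, hq1, by simpa using hPq⟩ h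
    · rintro h ⟨q, hq, hq1, hqa⟩
      exact hq1 (by rw [h q hq (by simpa using hqa)])
  rw [pvOthers_getD l p hnd hp, Bool.eq_iff_iff, List.isEmpty_iff,
    List.eq_nil_iff_forall_not_mem, List.all_eq_true]
  constructor
  · intro h q hq
    have ha : q.1 ∈ p.2.map (·.1) := List.mem_map_of_mem hq
    have hno : ¬ ∃ r ∈ l, r.1 ≠ p.1 ∧ q.1 ∈ r.2.map (·.1) := by
      intro hex
      exact h q.1 ((PySem.Set.mem_inter _ _ _).mpr ⟨(PySem.Set.mem_ofList _ _).mpr ha, (pvOthers_mem l p.1 _ q.1).mpr (Or.inr hex)⟩)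
    have := (hcore q.1 ha).mp hno
    rw [hcnt q.1, this]
    simp
  · intro h x hx
    obtain ⟨hx1, hx2⟩ := (PySem.Set.mem_inter _ _ _).mp hx
    obtain ⟨q, hq, rfl⟩ := List.mem_map.mp ((PySem.Set.mem_ofList _ _).mp hx1)
    have h1 := h q hq
    rw [hcnt] at h1
    have hcount : ((l.map (fun p => p.2.map (·.1))).flatten).count q.1 = 1 := by
      have := beq_iff_eq.mp h1
      exact_mod_cast this
    have hno := (hcore q.1 (List.mem_map_of_mem hq)).mpr hcount
    rcases (pvOthers_mem l p.1 _ q.1).mp hx2 with h0 | hex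
    · simp [PySem.Set.empty] at h0
    · exact hno hex

-- per-element agreement of the two third loops
theorem pvStep3_eq (l : List (String × List (Int × String))) (p : String × List (Int × String))
    (hnd : (l.map (·.1)).Nodup) (hinner : ∀ q ∈ l, (q.2.map (·.1)).Nodup) (hp : p ∈ l)
    (acc : PySem.Dict String (List Int) × PySem.Dict String (List (Int × String))) :
    pvAStep3 (pvAOthers l) acc p = pvBStep3 (pvBCounts l) acc p := by
  unfold pvAStep3 pvBStep3
  rw [pvCond_eq l p hnd hinner hp]
  by_cases hc : (p.2.all (fun q => (pvBCounts l).getD q.1 0 == 1)) = true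
  · simp only [hc, if_true]
    rw [pvInner_items p.2 (hinner p hp)]
  · simp [hc]

-- ===== VERDICT (by name: the statement is the Claim_ definition above) =====
theorem map_asn_to_u_mux_rel_spec : Claim_equal_map_asn_to_u_mux_rel := by
  intro a m _hdom hpre
  obtain ⟨h1, h2, h3, h4⟩ := hpre
  show _ = _
  simp only [map_asn_to_u_mux_rel, map_asn_to_u_mux_rel_alt]
  have e1 : a.foldl pvAStep1 (PySem.Dict.empty, PySem.Dict.empty)
      = a.foldl pvBStep1 (PySem.Dict.empty, PySem.Dict.empty) :=
    PySem.List.foldl_congr_mem _ _ _ _ (fun acc p hp => pvStep1_eq acc p (h2 p hp))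
  have e2 : m.foldl (pvAStep3 (pvAOthers m)) (PySem.Dict.empty, PySem.Dict.empty)
      = m.foldl (pvBStep3 (pvBCounts m)) (PySem.Dict.empty, PySem.Dict.empty) :=
    PySem.List.foldl_congr_mem _ _ _ _ (fun acc p hp => pvStep3_eq m p h3 h4 hp acc)
  rw [e1, e2]
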